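-- pv_equiv track=rewrite | github.com/jk-jung/problem-solving | codewars/6kyu/6_String tops.py | tops
-- ===== SOURCE A (Python) =====
-- def tops(msg):
--     r, i, c = '', 0, 0
--     while i < len(msg):
--         c += 1
--         i += c
--         if c % 2 and i < len(msg):
--             r += msg[i]
--     return r[::-1]
-- ===== SOURCE B (Python) =====
-- def _isqrt(x):
--     r = x
--     while True:
--         t = (r + x // r) // 2
--         if t >= r:
--             return r
--         r = t
--
--
-- def tops(msg):
--     n = len(msg)
--     if n == 0:
--         return ''
--     s = _isqrt(8 * n)
--     m = (s + 1) // 4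
--     return ''.join(msg[(2 * k + 1) * (k + 1)] for k in range(m - 1, -1, -1))
-- ===== Notes on version B (the rewrite author's own statement) =====
-- stated objective: alternative
-- what changed: B removes A's sequential scan entirely: it computes the number of picked characters m in closed form from len(msg) via a Newton integer square root ((isqrt(8n)+1)//4), then gathers msg[(2k+1)(k+1)] for k = m-1..0 descending, so there is no running (i,c) state, no stop-condition scan and no final reversal pass.
import Mathlib
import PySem

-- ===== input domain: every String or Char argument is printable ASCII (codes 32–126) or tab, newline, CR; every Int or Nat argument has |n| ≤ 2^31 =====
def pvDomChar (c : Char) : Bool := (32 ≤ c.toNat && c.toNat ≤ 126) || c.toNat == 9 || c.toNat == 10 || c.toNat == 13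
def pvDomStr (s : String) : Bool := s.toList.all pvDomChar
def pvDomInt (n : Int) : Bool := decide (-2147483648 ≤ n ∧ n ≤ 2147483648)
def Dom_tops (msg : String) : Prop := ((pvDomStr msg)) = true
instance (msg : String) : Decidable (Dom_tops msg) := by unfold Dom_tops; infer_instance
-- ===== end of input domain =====

-- B computes the pick count m in closed form (Newton integer sqrt of 8n) and gathers the
-- characters in descending index order, instead of A's sequential (r,i,c) scan; objective: alternative.

-- ===== PORT A =====
-- A's while loop: state r (collected chars), i (position), c (step); guard i < len(msg);
-- append msg[i] when c is odd and i still in range.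
def topsLoop (cs : List Char) (r : List Char) (i c : Nat) : List Char :=
  if _h : i < cs.length then
    let c' := c + 1
    let i' := i + c'
    let r' := if c' % 2 = 1 ∧ i' < cs.length then r ++ [cs.getD i' default] else r
    topsLoop cs r' i' c'
  else r
  termination_by cs.length - i
  decreasing_by omega

def tops (msg : String) : String :=
  String.mk ((topsLoop msg.toList [] 0 0).reverse)

-- ===== PORT B =====
-- B's _isqrt: Newton iteration t = (r + x//r)//2, stop when t ≥ r (Python's // on
-- nonnegative ints = Nat division, exact here).
def newtonLoop (x r : Nat) : Nat :=
  let t := (r + x / r) / 2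
  if _h : t < r then newtonLoop x t else r
  termination_by r
  decreasing_by omega

-- B: n = len(msg); if n == 0 return ''; s = _isqrt(8n); m = (s+1)//4;
-- join msg[(2k+1)(k+1)] for k in range(m-1,-1,-1)  (the descending range = (range m).reverse).
def tops_alt (msg : String) : String :=
  let cs := msg.toList
  let n := cs.length
  if n = 0 then "" else
    let s := newtonLoop (8 * n) (8 * n)
    let m := (s + 1) / 4
    String.mk (((List.range m).reverse).map (fun k => cs.getD ((2 * k + 1) * (k + 1)) default))

-- ===== PRECONDITION & SPEC =====
def Spec_tops (msg : String) (out : String) : Prop := out = tops_alt msg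
instance (msg : String) (out : String) : Decidable (Spec_tops msg out) := by unfold Spec_tops; infer_instance

-- ===== CLAIM (what is proved, stated in full; the proofs are below) =====
def Claim_equal_tops : Prop := ∀ (msg : String), Dom_tops msg → Spec_tops msg (tops msg)

-- ===== LEMMAS AND PROOFS =====

-- One-step unfolding of A's loop with the lets reduced.
theorem topsLoop_step (cs r : List Char) (i c : Nat) :
    topsLoop cs r i c =
      if i < cs.length then
        topsLoop cs
          (if (c + 1) % 2 = 1 ∧ i + (c + 1) < cs.length then r ++ [cs.getD (i + (c + 1)) default] else r)
          (i + (c + 1)) (c + 1)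
      else r := by
  rw [topsLoop]
  split <;> rfl

-- Proof-only helper: the odd-triangular gather loop, used to characterise A's result.
def gatherLoop (cs : List Char) (k : Nat) (acc : List Char) : List Char :=
  let pos := (2 * k + 1) * (k + 1)
  if _h : pos < cs.length then
    gatherLoop cs (k + 1) (acc ++ [cs.getD pos default])
  else acc
  termination_by cs.length - (2 * k + 1) * (k + 1)
  decreasing_by
    have : (2 * k + 1) * (k + 1) < (2 * (k + 1) + 1) * ((k + 1) + 1) := by nlinarith
    omega

theorem gatherLoop_step (cs : List Char) (k : Nat) (acc : List Char) :
    gatherLoop cs k acc =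
      if (2 * k + 1) * (k + 1) < cs.length then
        gatherLoop cs (k + 1) (acc ++ [cs.getD ((2 * k + 1) * (k + 1)) default])
      else acc := by
  rw [gatherLoop]
  split <;> rfl

-- A's state at the top of an even step c = 2k has i = T(2k) = k(2k+1); two A iterations
-- (odd step then even step) correspond to one gather iteration at index k.
theorem loop_eq (cs : List Char) :
    ∀ (n k : Nat) (r : List Char), cs.length ≤ k * (2 * k + 1) + n →
      topsLoop cs r (k * (2 * k + 1)) (2 * k) = gatherLoop cs k r := by
  intro n
  induction n with
  | zero =>
    intro k r hle
    rw [topsLoop_step, gatherLoop_step]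
    have h1 : ¬ k * (2 * k + 1) < cs.length := by omega
    have h2 : ¬ (2 * k + 1) * (k + 1) < cs.length := by nlinarith
    rw [if_neg h1, if_neg h2]
  | succ n ih =>
    intro k r hle
    rw [topsLoop_step, gatherLoop_step]
    by_cases hA : k * (2 * k + 1) < cs.length
    · rw [if_pos hA]
      by_cases hB : (2 * k + 1) * (k + 1) < cs.length
      · have hcond : (2 * k + 1) % 2 = 1 ∧
            k * (2 * k + 1) + (2 * k + 1) < cs.length := by
          constructor
          · omega
          · nlinarith
        rw [if_pos hB, if_pos hcond, topsLoop_step]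
        have hB' : k * (2 * k + 1) + (2 * k + 1) < cs.length := hcond.2
        rw [if_pos hB']
        have heven : ¬ ((2 * k + 1 + 1) % 2 = 1 ∧
            k * (2 * k + 1) + (2 * k + 1) + (2 * k + 1 + 1) < cs.length) := by
          intro h; omega
        rw [if_neg heven]
        have e2 : k * (2 * k + 1) + (2 * k + 1) + (2 * k + 1 + 1)
            = (k + 1) * (2 * (k + 1) + 1) := by ring
        have e3 : 2 * k + 1 + 1 = 2 * (k + 1) := by ring
        have e4 : k * (2 * k + 1) + (2 * k + 1) = (2 * k + 1) * (k + 1) := by ring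
        rw [e2, e3, e4, ih (k + 1) _ (by nlinarith)]
      · have hno : ¬ ((2 * k + 1) % 2 = 1 ∧
            k * (2 * k + 1) + (2 * k + 1) < cs.length) := by
          intro h; apply hB; nlinarith
        rw [if_neg hB, if_neg hno, topsLoop_step,
          if_neg (show ¬ k * (2 * k + 1) + (2 * k + 1) < cs.length by
            intro h; apply hB; nlinarith)]
    · have h2 : ¬ (2 * k + 1) * (k + 1) < cs.length := by nlinarith
      rw [if_neg hA, if_neg h2]

-- Newton's iteration computes the floor square root
theorem newtonLoop_step (x r : Nat) :
    newtonLoop x r =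
      if (r + x / r) / 2 < r then newtonLoop x ((r + x / r) / 2) else r := by
  rw [newtonLoop]
  split <;> rfl

-- invariant: x < (r+1)²; at exit additionally r² ≤ x.
theorem newtonLoop_correct : ∀ (r x : Nat), 1 ≤ x → 1 ≤ r → x < (r + 1) * (r + 1) →
    (newtonLoop x r) * (newtonLoop x r) ≤ x ∧
      x < (newtonLoop x r + 1) * (newtonLoop x r + 1) := by
  intro r
  induction r using Nat.strong_induction_on with
  | _ r ih =>
    intro x hx hr hinv
    rw [newtonLoop_step]
    have h1 : r * (x / r) + x % r = x := Nat.div_add_mod x r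
    have h2 : x % r < r := Nat.mod_lt x (by omega)
    by_cases h : (r + x / r) / 2 < r
    · rw [if_pos h]
      set q := x / r with hq
      set t := (r + q) / 2 with ht
      have h3 : r + q ≤ 2 * t + 1 := by omega
      have ht1 : 1 ≤ t := by
        have h2' : 2 ≤ r + q := by
          rcases Nat.lt_or_ge r 2 with hr2 | hr2
          · have hrr : r = 1 := by omega
            have hqx : q = x := by rw [hq, hrr, Nat.div_one]
            omega
          · exact le_trans hr2 (Nat.le_add_right r q)
        rw [ht]
        exact (Nat.le_div_iff_mul_le (by norm_num)).2 (by omega)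
      have h4 : x < r * (q + 1) := by nlinarith
      have h5 : 4 * (r * (q + 1)) ≤ (r + q + 1) * (r + q + 1) := by
        zify
        nlinarith [sq_nonneg ((r : ℤ) - (q : ℤ) - 1)]
      have h6 : r + q + 1 ≤ 2 * t + 2 := by omega
      have h7 : (r + q + 1) * (r + q + 1) ≤ (2 * t + 2) * (2 * t + 2) :=
        Nat.mul_le_mul h6 h6
      have hinv' : x < (t + 1) * (t + 1) := by nlinarith
      exact ih t h x hx ht1 hinv'
    · rw [if_neg h]
      constructor
      · have hq2 : r ≤ x / r := by omega
        have : r * r ≤ r * (x / r) := Nat.mul_le_mul_left r hq2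
        omega
      · exact hinv

-- characterisation of gatherLoop when 'position in range' is an initial segment [0, m)
theorem gatherLoop_char (cs : List Char) (m : Nat)
    (hm : ∀ j : Nat, (2 * j + 1) * (j + 1) < cs.length ↔ j < m) :
    ∀ (d k : Nat) (acc : List Char), m - k = d →
      gatherLoop cs k acc =
        acc ++ (List.range' k (m - k)).map
          (fun j => cs.getD ((2 * j + 1) * (j + 1)) default) := by
  intro d
  induction d with
  | zero =>
    intro k acc hd
    rw [gatherLoop_step, if_neg (by rw [hm]; omega)]
    rw [hd]
    simp
  | succ d ihd =>
    intro k acc hd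
    have hk : k < m := by omega
    rw [gatherLoop_step, if_pos ((hm k).2 hk)]
    rw [ihd (k + 1) _ (by omega)]
    have e : m - k = (m - (k + 1)) + 1 := by omega
    rw [e, List.range'_succ]
    simp

-- the pick count: (2j+1)(j+1) < n  iff  j < (isqrt(8n)+1)/4
theorem count_iff (n s : Nat) (hs1 : s * s ≤ 8 * n) (hs2 : 8 * n < (s + 1) * (s + 1))
    (j : Nat) : (2 * j + 1) * (j + 1) < n ↔ j < (s + 1) / 4 := by
  have hpos : 8 * ((2 * j + 1) * (j + 1)) + 1 = (4 * j + 3) * (4 * j + 3) := by ring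
  constructor
  · intro h
    have h8 : (4 * j + 3) * (4 * j + 3) < (s + 1) * (s + 1) := by omega
    have : 4 * j + 3 < s + 1 := by nlinarith
    omega
  · intro h
    have h43 : 4 * j + 3 ≤ s := by omega
    have : (4 * j + 3) * (4 * j + 3) ≤ s * s := Nat.mul_le_mul h43 h43
    omega

-- ===== VERDICT (by name: the statement is the Claim_ definition above) =====
theorem tops_spec : Claim_equal_tops := by
  intro msg _
  unfold Spec_tops tops tops_alt
  simp only
  set cs := msg.toList with hcs
  have h0 : topsLoop cs [] 0 0 = gatherLoop cs 0 [] := by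
    have := loop_eq cs cs.length 0 [] (by omega)
    simpa using this
  by_cases hn : cs.length = 0
  · rw [if_pos hn]
    rw [h0, gatherLoop_step, if_neg (by omega)]
    rfl
  · rw [if_neg hn]
    set x := 8 * cs.length with hx
    have hx1 : 1 ≤ x := by omega
    obtain ⟨hs1, hs2⟩ := newtonLoop_correct x x hx1 hx1 (by nlinarith)
    set s := newtonLoop x x with hs
    set m := (s + 1) / 4 with hm
    have hiff : ∀ j : Nat, (2 * j + 1) * (j + 1) < cs.length ↔ j < m :=
      fun j => count_iff cs.length s hs1 hs2 j
    rw [h0, gatherLoop_char cs m hiff (m - 0) 0 [] rfl]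
    simp [← List.range_eq_range', List.map_reverse]
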